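-- pv_equiv track=rewrite | github.com/alightcap/2425 | 7I Python/test_answers.py | get_total_spiciness
-- ===== SOURCE A (Python) =====
-- def get_total_spiciness(peppers: list[str]) -> int:
--     total_spiciness = 0
--
--     for pepper in peppers:
--         if pepper == "Poblano":
--             total_spiciness += 1500
--         if pepper == "Mirasol":
--             total_spiciness += 6000
--         if pepper == "Serrano":
--             total_spiciness += 15500
--         if pepper == "Cayenne":
--             total_spiciness += 40000
--         if pepper == "Thai":
--             total_spiciness += 75000
--         if pepper == "Habanero":
--             total_spiciness += 125000
--
--     return total_spiciness
-- ===== SOURCE B (Python) =====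
-- SPICE_TABLE = {
--     "Poblano": 1500,
--     "Mirasol": 6000,
--     "Serrano": 15500,
--     "Cayenne": 40000,
--     "Thai": 75000,
--     "Habanero": 125000,
-- }
--
--
-- def get_total_spiciness(peppers: list[str]) -> int:
--     counts = {}
--     for pepper in peppers:
--         counts[pepper] = counts.get(pepper, 0) + 1
--     total = 0
--     for name, value in SPICE_TABLE.items():
--         total += counts.get(name, 0) * value
--     return total
-- ===== Notes on version B (the rewrite author's own statement) =====
-- stated objective: alternative
-- what changed: B builds a frequency dict of the pepper list once and then sums count*value over the six fixed table entries, instead of A's per-element chain of six equality checks.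
import Mathlib
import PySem

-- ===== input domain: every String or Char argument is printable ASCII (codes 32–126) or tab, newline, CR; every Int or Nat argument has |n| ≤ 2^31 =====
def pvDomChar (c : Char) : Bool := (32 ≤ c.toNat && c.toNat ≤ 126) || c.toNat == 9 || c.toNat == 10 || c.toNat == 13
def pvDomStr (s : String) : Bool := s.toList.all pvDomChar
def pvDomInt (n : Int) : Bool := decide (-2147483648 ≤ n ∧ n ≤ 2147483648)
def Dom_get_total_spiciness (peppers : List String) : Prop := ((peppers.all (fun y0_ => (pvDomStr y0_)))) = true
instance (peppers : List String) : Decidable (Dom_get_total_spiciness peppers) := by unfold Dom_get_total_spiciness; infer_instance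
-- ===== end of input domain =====

-- B builds a frequency dict of the pepper list once and sums count*value over the six fixed table entries (alternative decomposition, same cost).


-- ===== PORT A =====
def get_total_spiciness (peppers : List String) : Int :=
  peppers.foldl (fun total_spiciness pepper =>
    let total_spiciness := if pepper = "Poblano" then total_spiciness + 1500 else total_spiciness
    let total_spiciness := if pepper = "Mirasol" then total_spiciness + 6000 else total_spiciness
    let total_spiciness := if pepper = "Serrano" then total_spiciness + 15500 else total_spiciness
    let total_spiciness := if pepper = "Cayenne" then total_spiciness + 40000 else total_spiciness
    let total_spiciness := if pepper = "Thai" then total_spiciness + 75000 else total_spiciness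
    let total_spiciness := if pepper = "Habanero" then total_spiciness + 125000 else total_spiciness
    total_spiciness) 0

-- ===== PORT B =====
def SPICE_TABLE : List (String × Int) :=
  [("Poblano", 1500), ("Mirasol", 6000), ("Serrano", 15500),
   ("Cayenne", 40000), ("Thai", 75000), ("Habanero", 125000)]

def get_total_spiciness_alt (peppers : List String) : Int :=
  let counts : PySem.Dict String Int :=
    peppers.foldl (fun d pepper => d.insert pepper (d.getD pepper 0 + 1)) PySem.Dict.empty
  SPICE_TABLE.foldl (fun total nv => total + counts.getD nv.1 0 * nv.2) 0

-- ===== PRECONDITION & SPEC =====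
def Spec_get_total_spiciness (peppers : List String) (out : Int) : Prop := out = get_total_spiciness_alt peppers
instance (peppers : List String) (out : Int) : Decidable (Spec_get_total_spiciness peppers out) := by unfold Spec_get_total_spiciness; infer_instance

-- ===== CLAIM (what is proved, stated in full; the proofs are below) =====
def Claim_equal_get_total_spiciness : Prop := ∀ (peppers : List String), Dom_get_total_spiciness peppers → Spec_get_total_spiciness peppers (get_total_spiciness peppers)

-- ===== LEMMAS AND PROOFS =====

-- B in closed form: the counter becomes List.count on each table name.
lemma alt_eq_counts (peppers : List String) :
    get_total_spiciness_alt peppers =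
      1500 * (peppers.count "Poblano" : Int) + 6000 * (peppers.count "Mirasol" : Int)
      + 15500 * (peppers.count "Serrano" : Int) + 40000 * (peppers.count "Cayenne" : Int)
      + 75000 * (peppers.count "Thai" : Int) + 125000 * (peppers.count "Habanero" : Int) := by
  unfold get_total_spiciness_alt SPICE_TABLE
  rw [PySem.Dict.foldl_insert_getD_add_one_eq_counter]
  simp [List.foldl, PySem.Dict.getD_counter]
  ring

-- A in closed form, by induction on the list.
lemma a_eq_counts (peppers : List String) :
    get_total_spiciness peppers =
      1500 * (peppers.count "Poblano" : Int) + 6000 * (peppers.count "Mirasol" : Int)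
      + 15500 * (peppers.count "Serrano" : Int) + 40000 * (peppers.count "Cayenne" : Int)
      + 75000 * (peppers.count "Thai" : Int) + 125000 * (peppers.count "Habanero" : Int) := by
  unfold get_total_spiciness
  suffices h : ∀ (init : Int), List.foldl
      (fun total_spiciness pepper =>
        let total_spiciness := if pepper = "Poblano" then total_spiciness + 1500 else total_spiciness
        let total_spiciness := if pepper = "Mirasol" then total_spiciness + 6000 else total_spiciness
        let total_spiciness := if pepper = "Serrano" then total_spiciness + 15500 else total_spiciness
        let total_spiciness := if pepper = "Cayenne" then total_spiciness + 40000 else total_spiciness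
        let total_spiciness := if pepper = "Thai" then total_spiciness + 75000 else total_spiciness
        let total_spiciness := if pepper = "Habanero" then total_spiciness + 125000 else total_spiciness
        total_spiciness) init peppers =
      init + 1500 * (peppers.count "Poblano" : Int) + 6000 * (peppers.count "Mirasol" : Int)
      + 15500 * (peppers.count "Serrano" : Int) + 40000 * (peppers.count "Cayenne" : Int)
      + 75000 * (peppers.count "Thai" : Int) + 125000 * (peppers.count "Habanero" : Int) by
    rw [h 0]; ring
  induction peppers with
  | nil => intro init; simp
  | cons p rest ih =>
    intro init
    simp only [List.foldl_cons, List.count_cons, ih]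
    by_cases h1 : p = "Poblano" <;> by_cases h2 : p = "Mirasol" <;>
    by_cases h3 : p = "Serrano" <;> by_cases h4 : p = "Cayenne" <;>
    by_cases h5 : p = "Thai" <;> by_cases h6 : p = "Habanero" <;>
    simp [h1, h2, h3, h4, h5, h6] <;> push_cast <;> try ring

-- ===== VERDICT (by name: the statement is the Claim_ definition above) =====
theorem get_total_spiciness_spec : Claim_equal_get_total_spiciness := by
  intro peppers _
  unfold Spec_get_total_spiciness
  rw [a_eq_counts, alt_eq_counts]
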